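-- pv_equiv track=rewrite | github.com/brandonharris177/edabit-challanges | index.py | differentSquares
-- ===== SOURCE A (Python) =====
-- def differentSquares(matrix):
--     squares = set()
--     coordinates = [[0,0], [0, +1], [+1, 0], [+1, +1]]
--     for rowIndex in range(len(matrix)-1):
--         for value in range(len(matrix[rowIndex])-1):
--             possibleSquare = ''
--             for coordinate in coordinates:
--                 possibleSquare+=str(matrix[rowIndex+coordinate[0]][value+coordinate[1]])
--             squares.add(possibleSquare)
--
--     return len(squares)
-- ===== SOURCE B (Python) =====
-- def differentSquares(matrix):
--     keys = []
--     for rowIndex in range(len(matrix) - 1):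
--         for value in range(len(matrix[rowIndex]) - 1):
--             keys.append(str(matrix[rowIndex][value])
--                         + str(matrix[rowIndex][value + 1])
--                         + str(matrix[rowIndex + 1][value])
--                         + str(matrix[rowIndex + 1][value + 1]))
--     keys.sort()
--     count = 0
--     prev = None
--     for k in keys:
--         if k != prev:
--             count += 1
--             prev = k
--     return count
-- ===== Notes on version B (the rewrite author's own statement) =====
-- stated objective: alternative
-- what changed: A deduplicates by inserting each 2x2 key string into a running set and returns its size; B appends all keys to a list, sorts it, and counts distinct keys in one pass over adjacent elements.
import Mathlib
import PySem

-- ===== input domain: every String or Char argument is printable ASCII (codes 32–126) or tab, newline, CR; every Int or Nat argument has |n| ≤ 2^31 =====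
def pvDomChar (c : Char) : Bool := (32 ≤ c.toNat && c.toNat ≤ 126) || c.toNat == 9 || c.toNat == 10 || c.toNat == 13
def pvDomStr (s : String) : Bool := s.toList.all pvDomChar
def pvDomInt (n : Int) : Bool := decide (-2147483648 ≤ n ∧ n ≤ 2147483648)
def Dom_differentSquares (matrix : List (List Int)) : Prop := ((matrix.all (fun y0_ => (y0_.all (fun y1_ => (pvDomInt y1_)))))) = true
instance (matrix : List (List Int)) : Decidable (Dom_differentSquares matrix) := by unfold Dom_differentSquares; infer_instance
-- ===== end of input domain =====

-- B replaces A's running set by collecting all 2x2 keys in a list, sorting it and counting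
-- distinct adjacent keys in one pass (objective: alternative decomposition, same exact count).

-- ===== PORT A =====
-- Python str keys are ported as List Char (PySem.Int.toChars = str(n)); set → PySem.Set.
def differentSquares (matrix : List (List Int)) : Int :=
  let coordinates : List (Int × Int) := [(0, 0), (0, 1), (1, 0), (1, 1)]
  let squares : PySem.Set (List Char) :=
    (PySem.List.pyRange 0 ((matrix.length : Int) - 1) 1).foldl (fun squares rowIndex =>
      (PySem.List.pyRange 0 (((PySem.List.pyGetD matrix rowIndex []).length : Int) - 1) 1).foldl
        (fun squares value =>
          let possibleSquare : List Char :=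
            coordinates.foldl (fun ps coordinate =>
              ps ++ PySem.Int.toChars
                (PySem.List.pyGetD (PySem.List.pyGetD matrix (rowIndex + coordinate.1) [])
                  (value + coordinate.2) 0)) []
          PySem.Set.add squares possibleSquare)
        squares)
      PySem.Set.empty
  PySem.Set.len squares

-- ===== PORT B =====
-- keys.sort() → PySem.List.sorted with the lexicographic linear order on List Char
-- (exact for Python's string comparison on decimal digit strings; instances given explicitly).
def differentSquares_alt (matrix : List (List Int)) : Int :=
  let keys : List (List Char) :=
    (PySem.List.pyRange 0 ((matrix.length : Int) - 1) 1).foldl (fun keys rowIndex =>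
      (PySem.List.pyRange 0 (((PySem.List.pyGetD matrix rowIndex []).length : Int) - 1) 1).foldl
        (fun keys value =>
          keys ++ [PySem.Int.toChars (PySem.List.pyGetD (PySem.List.pyGetD matrix rowIndex []) value 0)
            ++ PySem.Int.toChars (PySem.List.pyGetD (PySem.List.pyGetD matrix rowIndex []) (value + 1) 0)
            ++ PySem.Int.toChars (PySem.List.pyGetD (PySem.List.pyGetD matrix (rowIndex + 1) []) value 0)
            ++ PySem.Int.toChars (PySem.List.pyGetD (PySem.List.pyGetD matrix (rowIndex + 1) []) (value + 1) 0)])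
        keys)
      []
  let sortedKeys := @PySem.List.sorted (List Char) (List Char)
    List.instLinearOrder.toLT LinearOrder.toDecidableLT keys (fun k => k) false
  let r := sortedKeys.foldl
    (fun (st : Int × Option (List Char)) k => if st.2 ≠ some k then (st.1 + 1, some k) else st)
    ((0 : Int), (none : Option (List Char)))
  r.1

-- ===== PRECONDITION & SPEC =====
-- A (and B identically) raises IndexError exactly when some row of length ≥ 2 is followed by a
-- strictly shorter row; Pre_ excludes exactly those inputs (no input on which A returns is excluded).
def Pre_differentSquares (matrix : List (List Int)) : Prop :=
  ∀ i, i < matrix.length - 1 →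
    ((matrix.getD i []).length ≤ 1 ∨ (matrix.getD i []).length ≤ (matrix.getD (i + 1) []).length)
instance (matrix : List (List Int)) : Decidable (Pre_differentSquares matrix) := by
  unfold Pre_differentSquares; infer_instance
def pvWitness_differentSquares : List (List Int) := [[1, 2], [3, 4]]

def Spec_differentSquares (matrix : List (List Int)) (out : Int) : Prop := out = differentSquares_alt matrix
instance (matrix : List (List Int)) (out : Int) : Decidable (Spec_differentSquares matrix out) := by unfold Spec_differentSquares; infer_instance

-- ===== CLAIM (what is proved, stated in full; the proofs are below) =====
def Claim_equal_differentSquares : Prop := ∀ (matrix : List (List Int)), Dom_differentSquares matrix → Pre_differentSquares matrix → Spec_differentSquares matrix (differentSquares matrix)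

-- ===== LEMMAS AND PROOFS =====

/-- The string key of the 2×2 square at (i, j), right-associated as B writes it. -/
def pvKey (matrix : List (List Int)) (i j : Int) : List Char :=
  PySem.Int.toChars (PySem.List.pyGetD (PySem.List.pyGetD matrix i []) j 0)
    ++ PySem.Int.toChars (PySem.List.pyGetD (PySem.List.pyGetD matrix i []) (j + 1) 0)
    ++ PySem.Int.toChars (PySem.List.pyGetD (PySem.List.pyGetD matrix (i + 1) []) j 0)
    ++ PySem.Int.toChars (PySem.List.pyGetD (PySem.List.pyGetD matrix (i + 1) []) (j + 1) 0)

/-- All keys of `matrix`, in scan order. -/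
def pvKeys (matrix : List (List Int)) : List (List Char) :=
  (PySem.List.pyRange 0 ((matrix.length : Int) - 1) 1).flatMap (fun i =>
    (PySem.List.pyRange 0 (((PySem.List.pyGetD matrix i []).length : Int) - 1) 1).map (pvKey matrix i))

lemma pv_foldl_set_add {K : Type} [BEq K] (outer : List Int) (inner : Int → List Int)
    (key : Int → Int → K) (s : PySem.Set K) :
    outer.foldl (fun s i => (inner i).foldl (fun s j => PySem.Set.add s (key i j)) s) s
      = (outer.flatMap (fun i => (inner i).map (key i))).foldl PySem.Set.add s := by
  induction outer generalizing s with
  | nil => rfl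
  | cons x t ih =>
      simp only [List.foldl_cons, List.flatMap_cons, List.foldl_append, List.foldl_map, ih]

lemma pv_foldl_append {K : Type} (outer : List Int) (inner : Int → List Int)
    (key : Int → Int → K) (acc : List K) :
    outer.foldl (fun a i => (inner i).foldl (fun a j => a ++ [key i j]) a) acc
      = acc ++ outer.flatMap (fun i => (inner i).map (key i)) := by
  simp only [PySem.List.foldl_append_singleton_eq_map]
  exact PySem.List.foldl_append_eq_flatMap _ _ _

lemma pv_card_insert (s : Finset (List Char)) (y : List Char) :
    (insert y s).card = 1 + (s.erase y).card := by
  by_cases h : y ∈ s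
  · rw [Finset.insert_eq_self.mpr h, ← Finset.card_erase_add_one h, Nat.add_comm]
  · rw [Finset.card_insert_of_notMem h, Finset.erase_eq_of_notMem h, Nat.add_comm]

lemma pv_filter_ne_toFinset (t : List (List Char)) (x : List Char) :
    (t.filter (fun y => y ≠ x)).toFinset = t.toFinset.erase x := by
  ext z; simp [Finset.mem_erase, and_comm]

lemma pv_count_loop (t : List (List Char)) : ∀ (c : Int) (x : List Char),
    (∀ y ∈ t, x ≤ y) → t.Pairwise (· ≤ ·) →
    (t.foldl (fun (st : Int × Option (List Char)) k => if st.2 ≠ some k then (st.1 + 1, some k) else st)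
        (c, some x)).1
      = c + ((t.filter (fun y => y ≠ x)).toFinset.card : Int) := by
  induction t with
  | nil => intro c x _ _; simp
  | cons y t ih =>
      intro c x hx hp
      by_cases hyx : y = x
      · subst hyx
        simp only [List.foldl_cons]
        rw [if_neg (show ¬ ((c, some y) : Int × Option (List Char)).2 ≠ some y by simp)]
        rw [ih c y (fun z hz => hx z (List.mem_cons_of_mem _ hz)) hp.tail]
        congr 2
        simp
      · have hxy : x ≤ y := hx y List.mem_cons_self
        have hxlt : x < y := lt_of_le_of_ne hxy (fun h => hyx h.symm)
        have htx : ∀ z ∈ t, ¬ z = x := fun z hz h => by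
          have : x < z := lt_of_lt_of_le hxlt (List.rel_of_pairwise_cons hp hz)
          exact absurd (h ▸ this) (lt_irrefl x)
        have hfilt : t.filter (fun z => decide ¬ z = x) = t :=
          List.filter_eq_self.mpr (fun z hz => by simpa using htx z hz)
        simp only [List.foldl_cons]
        rw [if_pos (show ((c, some x) : Int × Option (List Char)).2 ≠ some y by
          simpa using fun h : x = y => hyx h.symm)]
        rw [ih (c + 1) y (fun z hz => List.rel_of_pairwise_cons hp hz) hp.tail]
        simp only [List.filter_cons, ne_eq, hyx, not_false_eq_true, decide_true, if_true]
        rw [show (t.filter (fun z => decide ¬ z = x)) = t from hfilt]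
        rw [List.toFinset_cons, pv_card_insert, ← pv_filter_ne_toFinset]
        push_cast
        ring

lemma pv_count_top (l : List (List Char)) (hp : l.Pairwise (· ≤ ·)) :
    (l.foldl (fun (st : Int × Option (List Char)) k => if st.2 ≠ some k then (st.1 + 1, some k) else st)
        ((0 : Int), (none : Option (List Char)))).1
      = (l.toFinset.card : Int) := by
  cases l with
  | nil => simp
  | cons x t =>
      simp only [List.foldl_cons]
      rw [if_pos (show ((0 : Int), (none : Option (List Char))).2 ≠ some x by simp)]
      rw [pv_count_loop t (0 + 1) x (fun z hz => List.rel_of_pairwise_cons hp hz) hp.tail]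
      rw [List.toFinset_cons, pv_card_insert, ← pv_filter_ne_toFinset]
      push_cast
      ring

lemma pv_set_len (l : List (List Char)) :
    PySem.Set.len (List.foldl PySem.Set.add [] l) = (l.toFinset.card : Int) := by
  rw [← PySem.Set.ofList_eq_foldl]
  have h1 : (PySem.Set.ofList l).toFinset = l.toFinset := by
    ext z; simp [PySem.Set.mem_ofList]
  have h2 := List.toFinset_card_of_nodup (PySem.Set.nodup_ofList l)
  show ((PySem.Set.ofList l).length : Int) = _
  rw [← h2, h1]

lemma pv_A_eq (matrix : List (List Int)) :
    differentSquares matrix = PySem.Set.len (List.foldl PySem.Set.add [] (pvKeys matrix)) := by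
  have hkey : ∀ (i j : Int),
      ([(0, 0), (0, 1), (1, 0), (1, 1)] : List (Int × Int)).foldl (fun ps coordinate =>
        ps ++ PySem.Int.toChars
          (PySem.List.pyGetD (PySem.List.pyGetD matrix (i + coordinate.1) [])
            (j + coordinate.2) 0)) []
        = pvKey matrix i j := by
    intro i j
    simp [pvKey, List.foldl_cons, List.foldl_nil, List.append_assoc]
  unfold differentSquares
  simp only [hkey]
  rw [pv_foldl_set_add]
  rfl

lemma pv_B_eq (matrix : List (List Int)) :
    differentSquares_alt matrix = ((pvKeys matrix).toFinset.card : Int) := by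
  simp only [differentSquares_alt]
  rw [pv_foldl_append]
  have hk : (PySem.List.pyRange 0 ((matrix.length : Int) - 1) 1).flatMap
      (fun i => (PySem.List.pyRange 0 (((PySem.List.pyGetD matrix i []).length : Int) - 1) 1).map
        (fun j => PySem.Int.toChars (PySem.List.pyGetD (PySem.List.pyGetD matrix i []) j 0)
          ++ PySem.Int.toChars (PySem.List.pyGetD (PySem.List.pyGetD matrix i []) (j + 1) 0)
          ++ PySem.Int.toChars (PySem.List.pyGetD (PySem.List.pyGetD matrix (i + 1) []) j 0)
          ++ PySem.Int.toChars (PySem.List.pyGetD (PySem.List.pyGetD matrix (i + 1) []) (j + 1) 0)))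
      = pvKeys matrix := rfl
  rw [List.nil_append, hk]
  rw [pv_count_top _ (PySem.List.sorted_pairwise (pvKeys matrix) (fun k => k))]
  rw [List.toFinset_eq_of_perm _ _ (@PySem.List.sorted_perm (List Char) (List Char) List.instLinearOrder.toLT LinearOrder.toDecidableLT (pvKeys matrix) (fun k => k) false)]

-- ===== VERDICT (by name: the statement is the Claim_ definition above) =====
theorem differentSquares_spec : Claim_equal_differentSquares := by
  intro matrix _ _
  unfold Spec_differentSquares
  rw [pv_A_eq, pv_set_len, pv_B_eq]
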